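-- pv_equiv track=rewrite | github.com/jamesthomasallen/advent2020 | advent/days/day10.py | chunk_joltages
-- ===== SOURCE A (Python) =====
-- def chunk_joltages(joltages: list[int], max_diff: int) -> list[list[int]]:
--     result = []
--     diffs = [joltages[i] - joltages[i-1] for i in range(1, len(joltages))]
--     while joltages:
--         if max_diff in diffs:
--             index = diffs.index(max_diff) + 1
--         else:
--             index = len(joltages)
--         result.append(joltages[:index])
--         joltages = joltages[index:]
--         diffs = diffs[index:]
--     return result
-- ===== SOURCE B (Python) =====
-- def chunk_joltages(joltages: list[int], max_diff: int) -> list[list[int]]: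
--     result = []
--     chunk = []
--     for x in joltages:
--         if chunk and x - chunk[-1] == max_diff:
--             result.append(chunk)
--             chunk = [x]
--         else:
--             chunk.append(x)
--     if chunk:
--         result.append(chunk)
--     return result
-- ===== Notes on version B (the rewrite author's own statement) =====
-- stated objective: alternative
-- what changed: Replaces A's while-loop that precomputes a diff list, rescans it with 'in'/'index' and reslices both lists each round with a single linear pass that closes the current chunk whenever an adjacent difference equals max_diff.
import Mathlib
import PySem

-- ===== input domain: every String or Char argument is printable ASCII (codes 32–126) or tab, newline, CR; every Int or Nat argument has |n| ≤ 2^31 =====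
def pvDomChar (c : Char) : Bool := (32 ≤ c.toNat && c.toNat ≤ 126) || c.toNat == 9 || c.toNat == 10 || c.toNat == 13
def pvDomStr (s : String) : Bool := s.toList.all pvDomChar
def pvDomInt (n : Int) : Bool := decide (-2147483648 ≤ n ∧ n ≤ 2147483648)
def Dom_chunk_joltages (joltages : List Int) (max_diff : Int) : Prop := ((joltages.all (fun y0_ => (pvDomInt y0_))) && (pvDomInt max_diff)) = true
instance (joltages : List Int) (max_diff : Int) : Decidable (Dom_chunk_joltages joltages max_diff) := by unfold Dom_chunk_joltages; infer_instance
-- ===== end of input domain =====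

-- B replaces A's rescan-and-reslice while-loop by a single linear pass over the list (objective: alternative).

-- ===== PORT A =====
-- diffs = [joltages[i] - joltages[i-1] for i in range(1, len(joltages))]
-- (indices i and i-1 are always in range here, so pyGetD with default 0 is exact)
def pvDiffsA (joltages : List Int) : List Int :=
  (PySem.List.pyRange 1 (PySem.List.len joltages) 1).map
    (fun i => PySem.List.pyGetD joltages i 0 - PySem.List.pyGetD joltages (i - 1) 0)

-- 'index = diffs.index(max_diff) + 1 if max_diff in diffs else len(joltages)'
def pvIndexA (diffs : List Int) (max_diff : Int) (joltages : List Int) : Nat :=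
  match PySem.List.index? diffs max_diff with
  | some i => i + 1
  | none => joltages.length

theorem pvIndexA_pos (d : List Int) (m : Int) (js : List Int) (h : js ≠ []) :
    1 ≤ pvIndexA d m js := by
  unfold pvIndexA
  rcases PySem.List.index? d m with _ | i
  · exact Nat.one_le_iff_ne_zero.mpr (by simpa using h)
  · show 1 ≤ i + 1
    omega

-- the 'while joltages:' loop of A; terminates because index ≥ 1 whenever joltages ≠ []
def pvLoopA (max_diff : Int) (joltages diffs : List Int) : List (List Int) :=
  if h : joltages = [] then []
  else
    let index := pvIndexA diffs max_diff joltages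
    PySem.List.slice joltages none (some (index : Int)) ::
      pvLoopA max_diff (PySem.List.slice joltages (some (index : Int)) none)
        (PySem.List.slice diffs (some (index : Int)) none)
termination_by joltages.length
decreasing_by
  rw [PySem.List.slice_from_natCast]
  have h1 := pvIndexA_pos diffs max_diff joltages h
  have h2 : 0 < joltages.length := List.length_pos_iff.mpr h
  simp only [List.length_drop]; omega

def chunk_joltages (joltages : List Int) (max_diff : Int) : List (List Int) :=
  pvLoopA max_diff joltages (pvDiffsA joltages)

-- ===== PORT B =====
-- the 'for x in joltages:' loop of B, carrying the current chunk; chunk[-1] = getLast?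
def pvLoopB (max_diff : Int) (chunk : List Int) : List Int → List (List Int)
  | [] => if chunk ≠ [] then [chunk] else []   -- trailing 'if chunk: result.append(chunk)'
  | x :: xs =>
    match chunk.getLast? with
    | some l =>
      if x - l = max_diff then chunk :: pvLoopB max_diff [x] xs
      else pvLoopB max_diff (chunk ++ [x]) xs
    | none => pvLoopB max_diff (chunk ++ [x]) xs

def chunk_joltages_alt (joltages : List Int) (max_diff : Int) : List (List Int) :=
  pvLoopB max_diff [] joltages

-- ===== PRECONDITION & SPEC =====
def Spec_chunk_joltages (joltages : List Int) (max_diff : Int) (out : List (List Int)) : Prop := out = chunk_joltages_alt joltages max_diff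
instance (joltages : List Int) (max_diff : Int) (out : List (List Int)) : Decidable (Spec_chunk_joltages joltages max_diff out) := by unfold Spec_chunk_joltages; infer_instance

-- ===== CLAIM (what is proved, stated in full; the proofs are below) =====
def Claim_equal_chunk_joltages : Prop := ∀ (joltages : List Int) (max_diff : Int), Dom_chunk_joltages joltages max_diff → Spec_chunk_joltages joltages max_diff (chunk_joltages joltages max_diff)

-- ===== LEMMAS AND PROOFS =====

-- mathematical adjacent-difference list
def pvDJ (js : List Int) : List Int := List.zipWith (fun b a => b - a) js.tail js

theorem pvDJ_single (x : Int) : pvDJ [x] = [] := rfl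
theorem pvDJ_cons_cons (x y : Int) (t : List Int) :
    pvDJ (x :: y :: t) = (y - x) :: pvDJ (y :: t) := rfl

theorem pvDJ_length (js : List Int) : (pvDJ js).length = js.length - 1 := by
  simp [pvDJ]

theorem pvDiffsA_eq (js : List Int) : pvDiffsA js = pvDJ js := by
  apply List.ext_getElem
  · simp [pvDiffsA, pvDJ, PySem.List.length_pyRange_one]
  · intro k h1 h2
    have hk : k < js.length - 1 := by simpa [pvDJ] using h2
    simp only [pvDiffsA]
    rw [List.getElem_map, PySem.List.getElem_pyRange_one]
    have e2 : (1 : Int) + (k : Int) - 1 = ((k : Nat) : Int) := by omega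
    have e1 : (1 : Int) + (k : Int) = ((k + 1 : Nat) : Int) := by omega
    rw [e2, e1, PySem.List.pyGetD_natCast, PySem.List.pyGetD_natCast,
        List.getD_eq_getElem js 0 (by omega), List.getD_eq_getElem js 0 (by omega)]
    simp [pvDJ, List.getElem_tail]

-- unfolding equations for pvLoopA
theorem pvLoopA_nil (m : Int) (d : List Int) : pvLoopA m [] d = [] := by
  rw [pvLoopA]; simp

theorem pvLoopA_cons (m : Int) (js d : List Int) (h : js ≠ []) :
    pvLoopA m js d =
      PySem.List.slice js none (some ((pvIndexA d m js : Nat) : Int)) ::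
        pvLoopA m (PySem.List.slice js (some ((pvIndexA d m js : Nat) : Int)) none)
          (PySem.List.slice d (some ((pvIndexA d m js : Nat) : Int)) none) := by
  rw [pvLoopA]; simp [h]

-- splitting the diff list at a chunk boundary
theorem pvDJ_append (c : List Int) (l : Int) (hc : c.getLast? = some l)
    (x : Int) (t : List Int) :
    pvDJ (c ++ x :: t) = pvDJ c ++ (x - l) :: pvDJ (x :: t) := by
  induction c with
  | nil => simp at hc
  | cons a c ih =>
    cases c with
    | nil =>
      simp at hc; subst hc
      simp [pvDJ_cons_cons, pvDJ_single]
    | cons b c' =>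
      have hc' : (b :: c').getLast? = some l := by
        rw [List.getLast?_cons_cons] at hc; exact hc
      have := ih hc'
      simp only [List.cons_append, pvDJ_cons_cons] at *
      rw [this]

-- key invariant: with a nonempty current chunk containing no internal cut,
-- B's linear pass computes exactly what A's slicing loop computes on the full rest
theorem pvKey (m : Int) (xs : List Int) : ∀ (c : List Int), c ≠ [] →
    m ∉ pvDJ c → pvLoopB m c xs = pvLoopA m (c ++ xs) (pvDJ (c ++ xs)) := by
  induction xs with
  | nil =>
    intro c hc hm
    rw [List.append_nil, pvLoopA_cons m c _ hc]
    have hidx : pvIndexA (pvDJ c) m c = c.length := by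
      unfold pvIndexA
      rw [(PySem.List.index?_eq_none_iff _ _).mpr hm]
    rw [hidx, PySem.List.slice_to_natCast, PySem.List.slice_from_natCast,
        PySem.List.slice_from_natCast]
    simp [pvLoopB, hc, pvLoopA_nil]
  | cons x xs ih =>
    intro c hc hm
    obtain ⟨l, hl⟩ : ∃ l, c.getLast? = some l :=
      Option.isSome_iff_exists.mp (by simpa [List.getLast?_isSome] using hc)
    have hdj := pvDJ_append c l hl x xs
    have hlenDJ : (pvDJ c).length = c.length - 1 := pvDJ_length c
    have hcpos : 0 < c.length := List.length_pos_iff.mpr hc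
    simp only [pvLoopB, hl]
    by_cases hcut : x - l = m
    · -- cut here: A finds the first max_diff exactly at the chunk boundary
      simp only [if_pos hcut]
      rw [pvLoopA_cons m _ _ (by simp)]
      have hsplit : pvDJ (c ++ x :: xs) = (pvDJ c ++ [m]) ++ pvDJ (x :: xs) := by
        rw [hdj, hcut]; simp
      have hidx : pvIndexA (pvDJ (c ++ x :: xs)) m (c ++ x :: xs) = c.length := by
        unfold pvIndexA
        rw [hsplit, PySem.List.index?_append_of_mem _ (by simp),
            PySem.List.index?_append_singleton_self _ m hm]
        show (pvDJ c).length + 1 = c.length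
        omega
      rw [hidx, PySem.List.slice_to_natCast, PySem.List.slice_from_natCast,
          PySem.List.slice_from_natCast]
      have hlen2 : (pvDJ c ++ [m]).length = c.length := by simp; omega
      have hdropd : (pvDJ (c ++ x :: xs)).drop c.length = pvDJ (x :: xs) := by
        rw [hsplit, ← hlen2, List.drop_left]
      rw [List.take_left' rfl, List.drop_left' rfl, hdropd,
          ih [x] (by simp) (by simp [pvDJ_single])]
      simp
    · -- no cut: extend the current chunk
      simp only [if_neg hcut]
      have hm' : m ∉ pvDJ (c ++ [x]) := by
        rw [pvDJ_append c l hl x []]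
        simp [pvDJ_single]
        exact ⟨hm, fun h => hcut h.symm⟩
      rw [ih (c ++ [x]) (by simp) hm', List.append_assoc]
      simp

-- ===== VERDICT (by name: the statement is the Claim_ definition above) =====
theorem chunk_joltages_spec : Claim_equal_chunk_joltages := by
  intro js m _
  unfold Spec_chunk_joltages chunk_joltages chunk_joltages_alt
  cases js with
  | nil => simp [pvLoopA_nil, pvLoopB]
  | cons x t =>
    rw [pvDiffsA_eq]
    have := pvKey m t [x] (by simp) (by simp [pvDJ_single])
    simp only [List.cons_append, List.nil_append] at this
    rw [← this]
    simp [pvLoopB]
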